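-- pv_equiv track=rewrite | github.com/SFB1102/b7-b6-prompting-eamt2024 | 1_parse_extract_feats/tabulate_input.py | get_doc_id
-- ===== SOURCE A (Python) =====
-- def get_doc_id(chunk=None):
--     doc_id = None
--     lines0 = chunk.split('\n')
--     for line0 in lines0:
--         if line0.startswith('<text'):
--             bits = line0.split()
--             for bit in bits:
--                 if bit.startswith('my_id="'):
--                     doc_id = bit.split('"')[1]
--     return doc_id
-- ===== SOURCE B (Python) =====
-- def get_doc_id(chunk=None):
--     # Search back-to-front and return at the first hit: equivalent to A's
--     # forward scan where the last my_id="..." token wins.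
--     for line in reversed(chunk.split('\n')):
--         if line.startswith('<text'):
--             for bit in reversed(line.split()):
--                 if bit.startswith('my_id="'):
--                     return bit.split('"')[1]
--     return None
-- ===== Notes on version B (the rewrite author's own statement) =====
-- stated objective: alternative
-- what changed: B searches the reversed lines and reversed tokens back-to-front and returns at the first matching my_id token (A's last-match-wins becomes first match of the reversed sequence), instead of A's forward scan with an overwriting accumulator.
import Mathlib
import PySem

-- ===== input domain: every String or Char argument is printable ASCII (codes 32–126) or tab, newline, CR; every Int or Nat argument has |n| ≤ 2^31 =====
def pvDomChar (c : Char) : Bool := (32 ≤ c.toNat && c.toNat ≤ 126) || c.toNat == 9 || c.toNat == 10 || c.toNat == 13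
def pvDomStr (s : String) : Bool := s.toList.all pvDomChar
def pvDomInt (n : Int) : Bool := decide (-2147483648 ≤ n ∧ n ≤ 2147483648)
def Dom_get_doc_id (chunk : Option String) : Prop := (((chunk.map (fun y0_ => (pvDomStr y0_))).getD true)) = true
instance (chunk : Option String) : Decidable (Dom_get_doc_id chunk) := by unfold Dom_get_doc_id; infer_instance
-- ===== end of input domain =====

-- B searches the lines (and the tokens of each line) back-to-front and returns at the
-- first matching my_id token, instead of A's forward scan with an overwriting
-- accumulator; objective: alternative (early-return search, same cost).

-- ===== PORT A =====
def get_doc_id (chunk : Option String) : Option String :=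
  match chunk with
  | none => none   -- Python raises AttributeError on None; excluded by Pre_
  | some c =>
    ((PySem.Chars.splitOn c.toList ['\n']).foldl (fun doc_id line0 =>
        if PySem.Chars.startswith line0 "<text".toList then
          (PySem.Chars.split₀ line0).foldl (fun d bit =>
              if PySem.Chars.startswith bit "my_id=\"".toList then
                -- bit.split('"')[1]: index 1 always exists since bit contains a '"'
                some ((PySem.List.pyGet? (PySem.Chars.splitOn bit ['"']) 1).getD [])
              else d) doc_id
        else doc_id) none).map String.ofList

-- ===== PORT B =====
-- inner loop of B: first token of the (already reversed) list starting with my_id="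
def pvFindBit : List (List Char) → Option (List Char)
  | [] => none
  | bit :: rest =>
    if PySem.Chars.startswith bit "my_id=\"".toList then
      some ((PySem.List.pyGet? (PySem.Chars.splitOn bit ['"']) 1).getD [])
    else pvFindBit rest

-- outer loop of B over the (already reversed) lines, with B's early return
def pvFindLine : List (List Char) → Option (List Char)
  | [] => none
  | line :: rest =>
    if PySem.Chars.startswith line "<text".toList then
      match pvFindBit (PySem.Chars.split₀ line).reverse with
      | some v => some v
      | none => pvFindLine rest
    else pvFindLine rest

def get_doc_id_alt (chunk : Option String) : Option String :=
  match chunk with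
  | none => none   -- Python raises AttributeError on None; excluded by Pre_
  | some c => (pvFindLine (PySem.Chars.splitOn c.toList ['\n']).reverse).map String.ofList

-- ===== PRECONDITION & SPEC =====
-- Pre_ excludes only chunk = None, on which both Pythons raise AttributeError.
def Pre_get_doc_id (chunk : Option String) : Prop := chunk ≠ none
instance (chunk : Option String) : Decidable (Pre_get_doc_id chunk) := by unfold Pre_get_doc_id; infer_instance

def pvWitness_get_doc_id : Option String := some "<text my_id=\"d1\">\nhello"

def Spec_get_doc_id (chunk : Option String) (out : Option String) : Prop := out = get_doc_id_alt chunk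
instance (chunk : Option String) (out : Option String) : Decidable (Spec_get_doc_id chunk out) := by unfold Spec_get_doc_id; infer_instance

-- ===== CLAIM (what is proved, stated in full; the proofs are below) =====
def Claim_equal_get_doc_id : Prop := ∀ (chunk : Option String), Dom_get_doc_id chunk → Pre_get_doc_id chunk → Spec_get_doc_id chunk (get_doc_id chunk)

-- ===== LEMMAS AND PROOFS =====

lemma pvFindBit_append (a b : List (List Char)) :
    pvFindBit (a ++ b) = (pvFindBit a).or (pvFindBit b) := by
  induction a with
  | nil => simp only [List.nil_append, pvFindBit, Option.none_or]
  | cons x t ih =>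
    simp only [List.cons_append, pvFindBit]
    split_ifs
    · simp only [Option.some_or]
    · exact ih

lemma pvFindLine_append (a b : List (List Char)) :
    pvFindLine (a ++ b) = (pvFindLine a).or (pvFindLine b) := by
  induction a with
  | nil => simp only [List.nil_append, pvFindLine, Option.none_or]
  | cons x t ih =>
    simp only [List.cons_append, pvFindLine]
    split_ifs
    · cases pvFindBit (PySem.Chars.split₀ x).reverse
      · exact ih
      · simp only [Option.some_or]
    · exact ih

-- A's inner token loop (overwrite-on-match) equals B's reversed early-return search.
lemma pv_inner_fold (bits : List (List Char)) (d0 : Option (List Char)) :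
    bits.foldl (fun d bit =>
        if PySem.Chars.startswith bit "my_id=\"".toList then
          some ((PySem.List.pyGet? (PySem.Chars.splitOn bit ['\"']) 1).getD [])
        else d) d0
    = (pvFindBit bits.reverse).or d0 := by
  induction bits generalizing d0 with
  | nil => simp only [List.foldl_nil, List.reverse_nil, pvFindBit, Option.none_or]
  | cons x t ih =>
    simp only [List.foldl_cons, List.reverse_cons, ih, pvFindBit_append]
    cases pvFindBit t.reverse
    · simp only [Option.none_or, pvFindBit]
      split_ifs
      · rfl
      · simp only [Option.none_or]
    · simp only [Option.some_or]

-- A's outer line loop equals B's reversed early-return search over lines.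
lemma pv_outer_fold (lines : List (List Char)) (d0 : Option (List Char)) :
    lines.foldl (fun doc_id line0 =>
        if PySem.Chars.startswith line0 "<text".toList then
          (PySem.Chars.split₀ line0).foldl (fun d bit =>
              if PySem.Chars.startswith bit "my_id=\"".toList then
                some ((PySem.List.pyGet? (PySem.Chars.splitOn bit ['\"']) 1).getD [])
              else d) doc_id
        else doc_id) d0
    = (pvFindLine lines.reverse).or d0 := by
  induction lines generalizing d0 with
  | nil => simp only [List.foldl_nil, List.reverse_nil, pvFindLine, Option.none_or]
  | cons x t ih =>
    simp only [List.foldl_cons, List.reverse_cons, ih, pvFindLine_append]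
    cases pvFindLine t.reverse
    · simp only [Option.none_or, pvFindLine]
      split_ifs
      · rw [pv_inner_fold]
        cases pvFindBit (PySem.Chars.split₀ x).reverse
        · simp only [Option.none_or]
        · rfl
      · simp only [Option.none_or]
    · simp only [Option.some_or]

-- ===== VERDICT (by name: the statement is the Claim_ definition above) =====
theorem get_doc_id_spec : Claim_equal_get_doc_id := by
  intro chunk _ hpre
  match chunk with
  | none => exact absurd rfl hpre
  | some c =>
    show _ = _
    simp only [get_doc_id, get_doc_id_alt]
    rw [pv_outer_fold, Option.or_none]
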